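-- pv_equiv track=rewrite | github.com/ConstantineLignos/WordSegmentation | tools/syllabification.py | get_coda
-- ===== SOURCE A (Python) =====
-- def get_coda(phonemes, consonants):
--     """Return the coda of a sequence of phonemes as a string"""
--     coda = []
--
--     # Build up the coda from the end of the string until we hit a vowel
--     for phoneme in phonemes[::-1]:
--         if phoneme in consonants:
--             coda.insert(0, phoneme)
--         else:
--             break
--
--     return '.'.join(coda)
-- ===== SOURCE B (Python) =====
-- def get_coda(phonemes, consonants):
--     """Return the coda of a sequence of phonemes as a string"""
--     # Forward pass: find the boundary index just past the last non-consonant,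
--     # then the coda is the slice from there to the end.
--     split = 0
--     for i, phoneme in enumerate(phonemes):
--         if phoneme not in consonants:
--             split = i + 1
--     return '.'.join(phonemes[split:])
-- ===== Notes on version B (the rewrite author's own statement) =====
-- stated objective: faster
-- what changed: Replaces the reverse scan with early break and quadratic insert(0, ...) by a single forward pass that records the index one past the last non-consonant and joins the tail slice.
import Mathlib
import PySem

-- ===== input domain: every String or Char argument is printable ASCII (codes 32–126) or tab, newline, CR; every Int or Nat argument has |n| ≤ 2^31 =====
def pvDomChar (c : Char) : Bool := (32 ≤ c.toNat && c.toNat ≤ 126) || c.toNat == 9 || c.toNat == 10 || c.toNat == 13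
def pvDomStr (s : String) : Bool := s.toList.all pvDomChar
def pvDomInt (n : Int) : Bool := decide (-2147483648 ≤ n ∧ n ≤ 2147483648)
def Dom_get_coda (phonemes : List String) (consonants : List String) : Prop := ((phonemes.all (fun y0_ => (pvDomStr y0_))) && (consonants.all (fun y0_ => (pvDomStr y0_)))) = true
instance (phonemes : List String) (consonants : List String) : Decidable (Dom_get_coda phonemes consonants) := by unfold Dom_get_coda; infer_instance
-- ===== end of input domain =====

-- B replaces A's reverse scan with early break by a forward pass locating the
-- split index and joining the tail slice (objective: faster; A's insert(0, ...) per kept phoneme is avoided).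

-- ===== PORT A =====
-- the for-loop over phonemes[::-1] with `coda.insert(0, phoneme)` and `break`
def getCodaLoopA (consonants : List String) : List String → List String → List String
  | [], coda => coda
  | p :: rest, coda =>
      if consonants.contains p then getCodaLoopA consonants rest (p :: coda)
      else coda

def get_coda (phonemes : List String) (consonants : List String) : String :=
  -- phonemes[::-1] is phonemes.reverse (PySem.List.slice?_none_none_neg_one)
  PySem.Str.join "." (getCodaLoopA consonants phonemes.reverse [])

-- ===== PORT B =====
def get_coda_alt (phonemes : List String) (consonants : List String) : String :=
  let split : Int :=
    (PySem.List.enumerate phonemes 0).foldl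
      (fun s ip => if !(consonants.contains ip.2) then ip.1 + 1 else s) 0
  PySem.Str.join "." (PySem.List.slice phonemes (some split) none)

-- ===== PRECONDITION & SPEC =====
def Spec_get_coda (phonemes : List String) (consonants : List String) (out : String) : Prop := out = get_coda_alt phonemes consonants
instance (phonemes : List String) (consonants : List String) (out : String) : Decidable (Spec_get_coda phonemes consonants out) := by unfold Spec_get_coda; infer_instance

-- ===== CLAIM (what is proved, stated in full; the proofs are below) =====
def Claim_equal_get_coda : Prop := ∀ (phonemes : List String) (consonants : List String), Dom_get_coda phonemes consonants → Spec_get_coda phonemes consonants (get_coda phonemes consonants)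

-- ===== LEMMAS AND PROOFS =====

theorem getCodaLoopA_eq (consonants : List String) (l coda : List String) :
    getCodaLoopA consonants l coda
      = (l.takeWhile (fun p => consonants.contains p)).reverse ++ coda := by
  induction l generalizing coda with
  | nil => rfl
  | cons p rest ih =>
      simp only [getCodaLoopA, List.takeWhile_cons]
      cases h : consonants.contains p
      · simp
      · simp [ih]

theorem foldl_split_eq (consonants : List String) (l : List String) :
    (PySem.List.enumerate l 0).foldl
        (fun s ip => if !(consonants.contains ip.2) then ip.1 + 1 else s) 0
      = ((l.length - (l.reverse.takeWhile (fun p => consonants.contains p)).length : Nat) : Int) := by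
  induction l using List.reverseRecOn with
  | nil => simp [PySem.List.enumerate]
  | append_singleton l x ih =>
      rw [PySem.List.enumerate_append, List.foldl_append, ih]
      simp only [PySem.List.enumerate_cons, PySem.List.enumerate_nil, List.foldl_cons,
        List.foldl_nil, List.reverse_append, List.reverse_singleton, List.singleton_append,
        List.takeWhile_cons, List.length_append, List.length_cons]
      cases h : consonants.contains x
      · simp
      · simp

theorem reverse_takeWhile_reverse_eq_drop (m : String → Bool) (l : List String) :
    ((l.reverse.takeWhile m).reverse)
      = l.drop (l.length - (l.reverse.takeWhile m).length) := by
  rw [show l = l.reverse.reverse by simp]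
  generalize l.reverse = r
  simp only [List.reverse_reverse, List.length_reverse]
  induction r with
  | nil => simp
  | cons x r ih =>
      cases h : m x
      · simp [h, List.drop_append]
      · have ht : (r.takeWhile m).length ≤ r.length := (List.takeWhile_prefix m).length_le
        simp only [List.takeWhile_cons, h, if_true, List.reverse_cons, List.length_cons]
        rw [show r.length + 1 - ((r.takeWhile m).length + 1) = r.length - (r.takeWhile m).length by omega,
          List.drop_append_of_le_length (by simp only [List.length_reverse]; omega), ih]

-- ===== VERDICT (by name: the statement is the Claim_ definition above) =====
theorem get_coda_spec : Claim_equal_get_coda := by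
  intro phonemes consonants _
  unfold Spec_get_coda get_coda get_coda_alt
  simp only [foldl_split_eq, PySem.List.slice_from_natCast, getCodaLoopA_eq,
    List.append_nil, reverse_takeWhile_reverse_eq_drop]
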